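-- pv_equiv track=rewrite | github.com/beesyst/strapi-app-bot | core/api/ai.py | clean_categories
-- ===== SOURCE A (Python) =====
-- def clean_categories(raw_cats, allowed_categories):
--     if not isinstance(raw_cats, list):
--         raw_cats = [c.strip() for c in raw_cats.split(",") if c.strip()]
--     allowed = {c.lower(): c for c in allowed_categories}
--     result = []
--     for c in raw_cats:
--         key = c.strip().lower()
--         if key in allowed and allowed[key] not in result:
--             result.append(allowed[key])
--     return result[:3]
-- ===== SOURCE B (Python) =====
-- def clean_categories(raw_cats, allowed_categories):
--     if not isinstance(raw_cats, list):
--         raw_cats = [c.strip() for c in raw_cats.split(",") if c.strip()]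
--     allowed = {a.lower(): a for a in allowed_categories}
--     pos = {}
--     for i, c in enumerate(raw_cats):
--         pos.setdefault(c.strip().lower(), i)
--     hits = [(pos[k], v) for k, v in allowed.items() if k in pos]
--     hits.sort(key=lambda p: p[0])
--     return [v for _, v in hits[:3]]
-- ===== Notes on version B (the rewrite author's own statement) =====
-- stated objective: alternative
-- what changed: B inverts the traversal: instead of A's single pass over raw_cats with an inline 'not in result' dedup, it records each normalised key's first position in one enumerate/setdefault pass, then iterates over the allowed map's entries, pairs each matched entry with that first-occurrence position, sorts the pairs by position and takes the first three values.
import Mathlib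
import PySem

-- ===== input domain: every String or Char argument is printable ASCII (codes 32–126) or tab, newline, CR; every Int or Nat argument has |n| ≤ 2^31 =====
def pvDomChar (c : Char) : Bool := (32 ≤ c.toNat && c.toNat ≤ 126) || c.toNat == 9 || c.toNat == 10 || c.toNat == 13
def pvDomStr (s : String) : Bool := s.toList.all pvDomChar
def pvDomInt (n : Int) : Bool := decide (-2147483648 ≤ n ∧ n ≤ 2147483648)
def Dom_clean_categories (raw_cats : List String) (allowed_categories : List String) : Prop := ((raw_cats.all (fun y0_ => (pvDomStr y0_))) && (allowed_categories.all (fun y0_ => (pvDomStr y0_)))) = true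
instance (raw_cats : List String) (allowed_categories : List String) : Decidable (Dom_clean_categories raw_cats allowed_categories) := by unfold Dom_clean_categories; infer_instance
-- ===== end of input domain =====

-- B inverts the iteration: instead of A's single pass over raw_cats with an inline membership dedup,
-- it records each normalised key's first position, loops over the allowed map's entries, pairs each
-- matched entry with that position, sorts the pairs by position and takes three (objective: alternative).
-- raw_cats is a List String here, so A's isinstance(list) branch never splits a string.

-- ===== PORT A =====
def clean_categories (raw_cats : List String) (allowed_categories : List String) : List String :=
  let allowed : PySem.Dict String String :=
    allowed_categories.foldl (fun d c => d.insert (PySem.Str.lower c) c) PySem.Dict.empty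
  let result : List String :=
    raw_cats.foldl (fun result c =>
      let key := PySem.Str.lower (PySem.Str.strip c)
      -- 'key in allowed and allowed[key] not in result' via get? (some ↔ key in allowed)
      match allowed.get? key with
      | some v => if result.contains v then result else result ++ [v]
      | none => result) []
  PySem.List.slice result none (some 3)

-- ===== PORT B =====
def clean_categories_alt (raw_cats : List String) (allowed_categories : List String) : List String :=
  let allowed : PySem.Dict String String :=
    allowed_categories.foldl (fun d c => d.insert (PySem.Str.lower c) c) PySem.Dict.empty
  -- 'for i, c in enumerate(raw_cats): pos.setdefault(c.strip().lower(), i)'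
  let pos : PySem.Dict String Int :=
    (PySem.List.enumerate raw_cats).foldl
      (fun d p => d.setdefault (PySem.Str.lower (PySem.Str.strip p.2)) p.1) PySem.Dict.empty
  -- '[(pos[k], v) for k, v in allowed.items() if k in pos]' ('k in pos' + 'pos[k]' via one get?)
  let hits : List (Int × String) :=
    allowed.items.filterMap (fun kv =>
      match pos.get? kv.1 with
      | some i => some (i, kv.2)
      | none => none)
  let sortedHits := PySem.List.sorted hits (fun p => p.1)
  (PySem.List.slice sortedHits none (some 3)).map (fun p => p.2)

-- ===== PRECONDITION & SPEC =====
def Spec_clean_categories (raw_cats : List String) (allowed_categories : List String) (out : List String) : Prop := out = clean_categories_alt raw_cats allowed_categories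
instance (raw_cats : List String) (allowed_categories : List String) (out : List String) : Decidable (Spec_clean_categories raw_cats allowed_categories out) := by unfold Spec_clean_categories; infer_instance

-- ===== CLAIM (what is proved, stated in full; the proofs are below) =====
def Claim_equal_clean_categories : Prop := ∀ (raw_cats : List String) (allowed_categories : List String), Dom_clean_categories raw_cats allowed_categories → Spec_clean_categories raw_cats allowed_categories (clean_categories raw_cats allowed_categories)

-- ===== LEMMAS AND PROOFS =====

-- A's interleaved loop is the ordered dedup (Set.ofList) of the list of its successful lookups.
lemma foldl_lookup_dedup (g : String → Option String) (xs : List String) (acc : List String) :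
    xs.foldl (fun r c =>
      match g c with
      | some v => if r.contains v then r else r ++ [v]
      | none => r) acc
    = (xs.filterMap g).foldl PySem.Set.add acc := by
  induction xs generalizing acc with
  | nil => rfl
  | cons x xs ih =>
    rw [List.foldl_cons, List.filterMap_cons]
    cases hx : g x with
    | none => exact ih acc
    | some v => exact ih _

-- filterMap of a dict lookup = filter by containment, then read the values off with getD.
lemma filterMap_get?_eq_filter_map (d : PySem.Dict String String) (xs : List String) :
    xs.filterMap d.get? = (xs.filter (fun k => d.contains k)).map (fun k => d.getD k "") := by
  induction xs with
  | nil => rfl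
  | cons x xs ih =>
    rw [List.filterMap_cons, List.filter_cons]
    cases hx : d.get? x with
    | none =>
      have hc : d.contains x = false := by
        rw [PySem.Dict.contains_eq_isSome_get?, hx]; rfl
      simp [hc, ih]
    | some v =>
      have hc : d.contains x = true := by
        rw [PySem.Dict.contains_eq_isSome_get?, hx]; rfl
      simp [hc, ih, PySem.Dict.getD_eq_get?_getD, hx]

-- every item of the allowed-map has its key equal to the lowercase of its value
lemma allowed_items_lower (l : List String) (d : PySem.Dict String String)
    (h : ∀ kv ∈ d.items, PySem.Str.lower kv.2 = kv.1) :
    ∀ kv ∈ (l.foldl (fun d c => d.insert (PySem.Str.lower c) c) d).items,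
      PySem.Str.lower kv.2 = kv.1 := by
  induction l generalizing d with
  | nil => exact h
  | cons c l ih =>
    rw [List.foldl_cons]
    refine ih _ (fun kv hkv => ?_)
    rcases (PySem.Dict.mem_items_insert _ _ _ _).1 hkv with hkv | hkv
    · rw [hkv]
    · exact h _ hkv.1

-- ordered dedup commutes with an injective-on-the-list map
lemma ofList_map_of_inj (f : String → String) (xs : List String)
    (hinj : ∀ a ∈ xs, ∀ b ∈ xs, f a = f b → a = b) :
    PySem.Set.ofList (xs.map f) = (PySem.Set.ofList xs).map f := by
  induction xs using List.reverseRecOn with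
  | nil => rfl
  | append_singleton xs x ih =>
    rw [List.map_append, List.map_singleton, PySem.Set.ofList_append_singleton,
      PySem.Set.ofList_append_singleton,
      ih (fun a ha b hb => hinj a (List.mem_append_left _ ha) b (List.mem_append_left _ hb)),
      PySem.Set.add_eq_ite, PySem.Set.add_eq_ite]
    by_cases hx : x ∈ PySem.Set.ofList xs
    · rw [if_pos (List.mem_map_of_mem hx), if_pos hx]
    · rw [if_neg (fun hmem => hx (by
        rcases List.mem_map.1 hmem with ⟨a, ha, hfa⟩
        rwa [hinj a (List.mem_append_left _ ((PySem.Set.mem_ofList _ _).1 ha)) x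
          (List.mem_append_right _ (List.mem_singleton_self x)) hfa] at ha)),
        if_neg hx, List.map_append, List.map_singleton]

-- ordered dedup commutes with filter
lemma ofList_filter (p : String → Bool) (xs : List String) :
    PySem.Set.ofList (xs.filter p) = (PySem.Set.ofList xs).filter p := by
  induction xs with
  | nil => rfl
  | cons x xs ih =>
    cases hx : p x with
    | true =>
      rw [List.filter_cons_of_pos hx, PySem.Set.ofList_cons, PySem.Set.ofList_cons,
        List.filter_cons_of_pos hx, ih, PySem.Set.discard, PySem.Set.discard, List.filter_filter]
      rw [List.filter_filter]
      congr 1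
      apply List.filter_congr
      intro y _
      rw [Bool.and_comm]
    | false =>
      rw [List.filter_cons_of_neg (by simp [hx]), ih, PySem.Set.ofList_cons,
        List.filter_cons_of_neg (by simp [hx]), PySem.Set.discard, List.filter_filter]
      apply List.filter_congr
      intro y _
      cases hy : p y with
      | false => simp
      | true =>
        have : y ≠ x := fun he => by rw [he, hx] at hy; exact Bool.false_ne_true hy
        simp [this]

-- ordered dedup lists elements in strictly increasing order of first occurrence
lemma ofList_pairwise_index (xs : List String) :
    (PySem.Set.ofList xs).Pairwise
      (fun a b => (PySem.List.index? xs a).getD 0 < (PySem.List.index? xs b).getD 0) := by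
  induction xs with
  | nil => exact List.Pairwise.nil
  | cons x xs ih =>
    rw [PySem.Set.ofList_cons]
    refine List.Pairwise.cons (fun b hb => ?_) ?_
    · rcases (PySem.Set.mem_discard _ _ _).1 hb with ⟨hbmem, hbne⟩
      have hbmem' : b ∈ xs := (PySem.Set.mem_ofList _ _).1 hbmem
      obtain ⟨i, hi⟩ : ∃ i, PySem.List.index? xs b = some i := by
        cases h : PySem.List.index? xs b with
        | none => exact absurd hbmem' ((PySem.List.index?_eq_none_iff _ _).1 h)
        | some i => exact ⟨i, rfl⟩
      rw [PySem.List.index?_cons_self, PySem.List.index?_cons_of_ne xs (fun he => hbne he.symm), hi]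
      simp
    · refine List.Pairwise.imp_of_mem ?_ (List.Pairwise.filter _ ih)
      intro a b ha hb hab
      rcases (PySem.Set.mem_discard _ _ _).1 ha with ⟨hamem, hane⟩
      rcases (PySem.Set.mem_discard _ _ _).1 hb with ⟨hbmem, hbne⟩
      rw [PySem.List.index?_cons_of_ne xs (fun he => hane he.symm),
        PySem.List.index?_cons_of_ne xs (fun he => hbne he.symm)]
      cases hia : PySem.List.index? xs a with
      | none => exact absurd ((PySem.Set.mem_ofList _ _).1 hamem) ((PySem.List.index?_eq_none_iff _ _).1 hia)
      | some i =>
        cases hib : PySem.List.index? xs b with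
        | none => exact absurd ((PySem.Set.mem_ofList _ _).1 hbmem) ((PySem.List.index?_eq_none_iff _ _).1 hib)
        | some j =>
          rw [hia, hib] at hab
          simpa using hab

-- the setdefault loop over enumerate records each key's FIRST position (s + its index)
lemma pos_get (key : String → String) (xs : List String) (s : Int)
    (d : PySem.Dict String Int) (k : String) :
    ((PySem.List.enumerate xs s).foldl (fun d p => d.setdefault (key p.2) p.1) d).get? k
    = (match d.get? k with
      | some v => some v
      | none => (PySem.List.index? (xs.map key) k).map (fun n => s + n)) := by
  induction xs generalizing s d with
  | nil =>
    rw [PySem.List.enumerate_nil, List.foldl_nil, List.map_nil]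
    cases d.get? k <;> rfl
  | cons x xs ih =>
    rw [PySem.List.enumerate_cons, List.foldl_cons, ih]
    by_cases hk : key x = k
    · subst hk
      rw [PySem.Dict.get?_setdefault_self, List.map_cons, PySem.List.index?_cons_self]
      cases h : d.get? (key x) <;> simp
    · have hset : (d.setdefault (key x) s).get? k = d.get? k := by
        by_cases hc : d.contains (key x) = true
        · rw [PySem.Dict.setdefault_of_contains _ _ hc]
        · rw [PySem.Dict.setdefault_of_not_contains _ _ (by simpa using hc),
            PySem.Dict.get?_insert_of_ne _ _ (fun he => hk he.symm)]
      rw [hset, List.map_cons, PySem.List.index?_cons_of_ne _ hk]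
      cases h : d.get? k with
      | some v => rfl
      | none =>
        cases hik : PySem.List.index? (xs.map key) k <;> simp
        omega

-- '[g(x) for x in xs if q(x)]' as a filterMap
lemma filterMap_guard {α β : Type} (q : α → Bool) (g : α → β) (xs : List α) :
    xs.filterMap (fun x => if q x then some (g x) else none) = (xs.filter q).map g := by
  induction xs with
  | nil => rfl
  | cons x xs ih => cases hx : q x <;> simp [hx, ih]

theorem clean_categories_spec : Claim_equal_clean_categories := by
  intro raw_cats allowed_categories _
  unfold Spec_clean_categories
  simp only [clean_categories, clean_categories_alt]
  set d : PySem.Dict String String :=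
    allowed_categories.foldl (fun d c => d.insert (PySem.Str.lower c) c) PySem.Dict.empty with hd
  set norm : List String := raw_cats.map (fun c => PySem.Str.lower (PySem.Str.strip c)) with hnorm
  set f : String → String := fun k => d.getD k "" with hf
  set g : String → Int × String :=
    fun k => ((((PySem.List.index? norm k).getD 0 : Nat) : Int), f k) with hg
  -- key facts about the allowed-map
  have hnk : d.keys.Nodup := by
    rw [hd]
    exact PySem.Dict.nodup_keys_foldl_insert_key allowed_categories
      (fun c => PySem.Str.lower c) (fun _ c => c) PySem.Dict.empty (by simp)
  have hlow : ∀ kv ∈ d.items, PySem.Str.lower kv.2 = kv.1 := by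
    rw [hd]
    exact allowed_items_lower allowed_categories PySem.Dict.empty
      (fun kv hkv => by simp [PySem.Dict.empty] at hkv)
  have hfl : ∀ k, d.contains k = true → PySem.Str.lower (f k) = k := by
    intro k hk
    rw [PySem.Dict.contains_eq_isSome_get?] at hk
    obtain ⟨v, hv⟩ := Option.isSome_iff_exists.1 hk
    rw [hf]
    simp only [PySem.Dict.getD_eq_get?_getD, hv, Option.getD_some]
    exact hlow (k, v) (PySem.Dict.mem_items_of_get?_eq_some (d := d) hv)
  have hfinj : ∀ a, d.contains a = true → ∀ b, d.contains b = true → f a = f b → a = b := by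
    intro a ha b hb hab
    rw [← hfl a ha, ← hfl b hb, hab]
  -- A's result: dedup of the matched values, in raw_cats order
  have hA : (raw_cats.foldl (fun result c =>
        match d.get? (PySem.Str.lower (PySem.Str.strip c)) with
        | some v => if result.contains v then result else result ++ [v]
        | none => result) [])
      = ((PySem.Set.ofList norm).filter (fun k => d.contains k)).map f := by
    rw [foldl_lookup_dedup (fun c => d.get? (PySem.Str.lower (PySem.Str.strip c))),
      ← PySem.Set.ofList_eq_foldl]
    have hcomp : List.filterMap (fun c => d.get? (PySem.Str.lower (PySem.Str.strip c))) raw_cats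
        = norm.filterMap d.get? := by
      rw [hnorm, List.filterMap_map]; rfl
    rw [hcomp, filterMap_get?_eq_filter_map d, ← hf,
      ofList_map_of_inj f _ (fun a ha b hb => hfinj a (List.of_mem_filter ha) b (List.of_mem_filter hb)),
      ofList_filter]
  -- B's position map: get? is the (cast) first index in norm
  set pos : PySem.Dict String Int :=
    (PySem.List.enumerate raw_cats).foldl
      (fun d p => d.setdefault (PySem.Str.lower (PySem.Str.strip p.2)) p.1) PySem.Dict.empty
    with hposd
  have hpos : ∀ k, pos.get? k = (PySem.List.index? norm k).map (fun n => (n : Int)) := by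
    intro k
    rw [hposd, pos_get (fun c => PySem.Str.lower (PySem.Str.strip c)) raw_cats 0
      PySem.Dict.empty k, ← hnorm]
    rw [PySem.Dict.get?_empty]
    cases PySem.List.index? norm k <;> simp
  -- B's sort: the hits in first-occurrence order
  have hhits : d.items.filterMap (fun kv =>
        match pos.get? kv.1 with
        | some i => some (i, kv.2)
        | none => none)
      = (d.keys.filter (fun k => norm.contains k)).map g := by
    rw [PySem.Dict.items_eq_map_keys d hnk ""]
    rw [List.filterMap_map]
    rw [List.filterMap_congr (g := fun k => if norm.contains k then some (g k) else none)
      (fun k _ => by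
        show (match pos.get? k with
          | some i => some (i, d.getD k "")
          | none => none) = _
        rw [hpos k]
        cases hik : PySem.List.index? norm k with
        | none =>
          have hmem : k ∉ norm := (PySem.List.index?_eq_none_iff _ _).1 hik
          simp [hmem]
        | some n =>
          have hmem : k ∈ norm := by
            by_contra hmem
            rw [(PySem.List.index?_eq_none_iff _ _).2 hmem] at hik
            simp at hik
          have hik' := hik
          rw [PySem.List.index?_eq_idxOf?] at hik'
          simp [hmem, hg, hf, hik'])]
    exact filterMap_guard (fun k => norm.contains k) g d.keys
  have hsorted : PySem.List.sorted
        (d.items.filterMap (fun kv =>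
          match pos.get? kv.1 with
          | some i => some (i, kv.2)
          | none => none))
        (fun p => p.1)
      = (((PySem.Set.ofList norm).filter (fun k => d.contains k)).map g) := by
    rw [hhits]
    apply PySem.List.sorted_eq_of_perm_of_pairwise_lt
    · apply List.Perm.map
      rw [List.perm_ext_iff_of_nodup
        (List.Nodup.filter _ (PySem.Set.nodup_ofList norm)) (List.Nodup.filter _ hnk)]
      intro k
      simp only [List.mem_filter, PySem.Set.mem_ofList, ← PySem.Dict.contains_iff_mem_keys,
        List.contains_iff_mem]
      tauto
    · rw [List.pairwise_map]
      refine List.Pairwise.imp ?_ (List.Pairwise.filter _ (ofList_pairwise_index norm))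
      intro a b h
      simp only [hg]
      exact_mod_cast h
  rw [hA, hsorted, PySem.List.slice_to _ (by norm_num), PySem.List.slice_to _ (by norm_num),
    ← List.map_take, ← List.map_take, List.map_map]
  rfl
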